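-- pv_equiv track=rewrite | github.com/drankine-transparent/localLLM | main.py | _insert_glossary_row
-- ===== SOURCE A (Python) =====
-- def _insert_glossary_row(content: str, row: str) -> str:
--     """Insert a table row into the last table in the glossary.
--
--     Finds the last separator (|---|) and inserts after all data rows
--     that follow it — never between header and separator.
--     """
--     lines = content.split("\n")
--     separators = [i for i, l in enumerate(lines) if l.strip().startswith("|--")]
--     if not separators:
--         return content.rstrip() + "\n" + row + "\n"
--     last_sep = separators[-1]
--     insert_at = last_sep + 1
--     while insert_at < len(lines) and lines[insert_at].strip().startswith("|"):
--         insert_at += 1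
--     lines.insert(insert_at, row)
--     return "\n".join(lines)
-- ===== SOURCE B (Python) =====
-- def _insert_glossary_row(content: str, row: str) -> str:
--     lines = content.split("\n")
--     insert_at = None
--     in_table = False
--     for i, l in enumerate(lines):
--         s = l.strip()
--         if s.startswith("|--"):
--             in_table = True
--             insert_at = i + 1
--         elif in_table and s.startswith("|"):
--             insert_at = i + 1
--         else:
--             in_table = False
--     if insert_at is None:
--         return content.rstrip() + "\n" + row + "\n"
--     lines.insert(insert_at, row)
--     return "\n".join(lines)
-- ===== Notes on version B (the rewrite author's own statement) =====
-- stated objective: alternative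
-- what changed: Replaces A's two scans (a separators index list comprehension followed by a while-loop re-indexing into lines) with a single forward enumerate pass carrying an insert_at/in_table state; no index list is built and lines is never indexed.
import Mathlib
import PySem

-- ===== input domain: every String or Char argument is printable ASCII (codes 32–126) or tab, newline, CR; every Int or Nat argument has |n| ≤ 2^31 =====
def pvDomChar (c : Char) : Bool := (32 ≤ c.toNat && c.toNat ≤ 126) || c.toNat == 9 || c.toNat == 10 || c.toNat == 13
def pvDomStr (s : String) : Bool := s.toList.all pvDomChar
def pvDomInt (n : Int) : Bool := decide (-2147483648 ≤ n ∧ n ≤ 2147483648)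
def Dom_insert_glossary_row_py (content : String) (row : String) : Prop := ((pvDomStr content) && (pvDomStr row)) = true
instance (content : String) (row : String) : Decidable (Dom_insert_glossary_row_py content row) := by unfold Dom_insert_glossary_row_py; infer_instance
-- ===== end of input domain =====

-- B replaces A's two scans (a separators list + a while loop) by one forward pass with an insert_at/in_table state (objective: alternative, same cost).

-- ===== PORT A =====
-- the while loop 'while insert_at < len(lines) and lines[insert_at].strip().startswith("|"): insert_at += 1'
def pvSkipA (lines : List String) (j : Nat) : Nat :=
  if h : j < lines.length then
    if PySem.Str.startswith (PySem.Str.strip lines[j]) "|" then pvSkipA lines (j + 1) else j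
  else j
termination_by lines.length - j

def insert_glossary_row_py (content : String) (row : String) : String :=
  let lines := (PySem.Str.split? content "\n").getD []
  let separators : List Int := (PySem.List.enumerate lines 0).foldl
      (fun acc p => if PySem.Str.startswith (PySem.Str.strip p.2) "|--" then acc ++ [p.1] else acc) []
  if hs : separators = [] then
    PySem.Str.rstrip content ++ "\n" ++ row ++ "\n"
  else
    let last_sep := separators.getLast hs
    let insert_at := pvSkipA lines (last_sep + 1).toNat
    PySem.Str.join "\n" (PySem.List.insert lines (insert_at : Int) row)

-- ===== PORT B =====
def insert_glossary_row_py_alt (content : String) (row : String) : String :=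
  let lines := (PySem.Str.split? content "\n").getD []
  let st := (PySem.List.enumerate lines 0).foldl
      (fun (st : Option Int × Bool) p =>
        let s := PySem.Str.strip p.2
        if PySem.Str.startswith s "|--" then (some (p.1 + 1), true)
        else if st.2 && PySem.Str.startswith s "|" then (some (p.1 + 1), st.2)
        else (st.1, false))
      ((none, false) : Option Int × Bool)
  match st.1 with
  | none => PySem.Str.rstrip content ++ "\n" ++ row ++ "\n"
  | some k => PySem.Str.join "\n" (PySem.List.insert lines k row)

-- ===== PRECONDITION & SPEC =====
def Spec_insert_glossary_row_py (content : String) (row : String) (out : String) : Prop := out = insert_glossary_row_py_alt content row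
instance (content : String) (row : String) (out : String) : Decidable (Spec_insert_glossary_row_py content row out) := by unfold Spec_insert_glossary_row_py; infer_instance

-- ===== CLAIM (what is proved, stated in full; the proofs are below) =====
def Claim_equal_insert_glossary_row_py : Prop := ∀ (content : String) (row : String), Dom_insert_glossary_row_py content row → Spec_insert_glossary_row_py content row (insert_glossary_row_py content row)

-- ===== LEMMAS AND PROOFS =====

-- abbreviations used only by the proofs
def pvSeps (ls : List String) : List Int :=
  (PySem.List.enumerate ls 0).foldl
      (fun acc p => if PySem.Str.startswith (PySem.Str.strip p.2) "|--" then acc ++ [p.1] else acc) []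

def pvStepB (st : Option Int × Bool) (p : Int × String) : Option Int × Bool :=
  let s := PySem.Str.strip p.2
  if PySem.Str.startswith s "|--" then (some (p.1 + 1), true)
  else if st.2 && PySem.Str.startswith s "|" then (some (p.1 + 1), st.2)
  else (st.1, false)

lemma pvSkipA_of_ge (ls : List String) (j : Nat) (h : ls.length ≤ j) : pvSkipA ls j = j := by
  unfold pvSkipA; rw [dif_neg (by omega)]

lemma pvSkipA_le (ls : List String) (j : Nat) (h : j ≤ ls.length) : pvSkipA ls j ≤ ls.length := by
  fun_induction pvSkipA ls j with
  | case1 j h1 h2 ih => exact ih (by omega)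
  | case2 j h1 h2 => omega
  | case3 j h1 => omega

lemma pvSkipA_append (ls : List String) (x : String) (j : Nat) (hj : j ≤ ls.length) :
    pvSkipA (ls ++ [x]) j =
      if pvSkipA ls j = ls.length ∧ PySem.Str.startswith (PySem.Str.strip x) "|" = true
      then ls.length + 1 else pvSkipA ls j := by
  fun_induction pvSkipA ls j with
  | case1 j h1 h2 ih =>
      have hx : (ls ++ [x])[j]'(by simp; omega) = ls[j] := by
        rw [List.getElem_append_left h1]
      rw [pvSkipA, dif_pos (by simp; omega), hx, if_pos h2, ih (by omega)]
  | case2 j h1 h2 =>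
      have hne : j ≠ ls.length := by omega
      rw [pvSkipA, dif_pos (by simp; omega)]
      rw [List.getElem_append_left h1, if_neg h2]
      rw [if_neg (by simp [hne])]
  | case3 j h1 =>
      have hj' : j = ls.length := by omega
      subst hj'
      rw [pvSkipA, dif_pos (by simp), List.getElem_append_right (by omega)]
      simp only [Nat.sub_self, List.getElem_singleton]
      by_cases hb : PySem.Str.startswith (PySem.Str.strip x) "|" = true
      · rw [if_pos hb, pvSkipA_of_ge (ls ++ [x]) (ls.length + 1) (by simp),
          if_pos ⟨trivial, hb⟩]
      · rw [if_neg hb, if_neg (fun hc => hb hc.2)]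

-- the single-pass state of B, characterised by A's quantities (last separator + skip)
set_option maxHeartbeats 1000000 in
lemma pvMain (ls : List String) :
    (∀ i ∈ pvSeps ls, 0 ≤ i ∧ i < (ls.length : Int)) ∧
    (pvSeps ls = [] → (PySem.List.enumerate ls 0).foldl pvStepB (none, false) = (none, false)) ∧
    (∀ h : pvSeps ls ≠ [], ∃ b : Bool,
      (PySem.List.enumerate ls 0).foldl pvStepB (none, false) =
        (some ((pvSkipA ls ((pvSeps ls).getLast h + 1).toNat : Nat) : Int), b) ∧
      (b = true ↔ pvSkipA ls ((pvSeps ls).getLast h + 1).toNat = ls.length)) := by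
  induction ls using List.reverseRecOn with
  | nil =>
      refine ⟨?_, fun _ => rfl, fun h => absurd rfl h⟩
      intro i hi; simp [pvSeps, PySem.List.enumerate] at hi
  | append_singleton ls x ih =>
      obtain ⟨hbnd, hnil, hcons⟩ := ih
      have hed : PySem.List.enumerate (ls ++ [x]) 0 =
          PySem.List.enumerate ls 0 ++ [((ls.length : Int), x)] := by
        rw [PySem.List.enumerate_append]
        simp [PySem.List.enumerate]
      have hseps : pvSeps (ls ++ [x]) =
          pvSeps ls ++ (if PySem.Str.startswith (PySem.Str.strip x) "|--" then [(ls.length : Int)] else []) := by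
        unfold pvSeps
        rw [hed, List.foldl_append]
        by_cases hx : PySem.Str.startswith (PySem.Str.strip x) "|--" = true
        · rw [List.foldl_cons, List.foldl_nil, if_pos hx, if_pos hx]
        · rw [List.foldl_cons, List.foldl_nil, if_neg hx, if_neg hx, List.append_nil]
      have hst : (PySem.List.enumerate (ls ++ [x]) 0).foldl pvStepB (none, false) =
          pvStepB ((PySem.List.enumerate ls 0).foldl pvStepB (none, false)) ((ls.length : Int), x) := by
        rw [hed, List.foldl_append]; rfl
      refine ⟨?_, ?_, ?_⟩
      · intro i hi
        rw [hseps] at hi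
        simp only [List.length_append, List.length_cons, List.length_nil]
        rcases List.mem_append.1 hi with h1 | h2
        · have := hbnd i h1; push_cast; omega
        · by_cases hx : PySem.Str.startswith (PySem.Str.strip x) "|--" = true
          · rw [if_pos hx] at h2
            rcases List.mem_singleton.1 h2
            push_cast; omega
          · rw [if_neg hx] at h2; simp at h2
      · intro hz
        rw [hseps] at hz
        rcases List.append_eq_nil_iff.1 hz with ⟨hz1, hz2⟩
        have hx : PySem.Str.startswith (PySem.Str.strip x) "|--" = false := by
          by_cases hx : PySem.Str.startswith (PySem.Str.strip x) "|--" = true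
          · rw [if_pos hx] at hz2; exact absurd hz2 (by simp)
          · simpa using hx
        rw [hst, hnil hz1]
        simp only [pvStepB, hx, Bool.false_eq_true, if_false, Bool.false_and]
      · intro h
        by_cases hx : PySem.Str.startswith (PySem.Str.strip x) "|--" = true
        · -- x is a separator line: insert_at becomes length+1, in_table true
          have hlast : (pvSeps (ls ++ [x])).getLast h = (ls.length : Int) := by
            have h1 : (pvSeps (ls ++ [x])).getLast? = some (ls.length : Int) := by
              rw [hseps, if_pos hx, List.getLast?_concat]
            rw [List.getLast?_eq_some_getLast h] at h1
            exact Option.some.inj h1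
          rw [hst, hlast]
          have htn : ((ls.length : Int) + 1).toNat = ls.length + 1 := by omega
          have hskip : pvSkipA (ls ++ [x]) ((ls.length : Int) + 1).toNat = ls.length + 1 := by
            rw [htn, pvSkipA_of_ge _ _ (by simp)]
          rw [hskip]
          have hstep : ∀ st : Option Int × Bool,
              pvStepB st ((ls.length : Int), x) = (some ((ls.length : Int) + 1), true) := by
            intro st; simp only [pvStepB, hx, if_true]
          refine ⟨true, ?_, ?_⟩
          · by_cases hls : pvSeps ls = []
            · rw [hnil hls, hstep]
              exact congrArg (·, true) (congrArg some (Nat.cast_add_one ls.length).symm)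
            · obtain ⟨b, hfold, _⟩ := hcons hls
              rw [hfold, hstep]
              exact congrArg (·, true) (congrArg some (Nat.cast_add_one ls.length).symm)
          · simp
        · -- x is not a separator: the separators list is unchanged
          have hls : pvSeps ls ≠ [] := by
            intro hz; rw [hseps, hz, if_neg hx] at h; exact h rfl
          have hEq : pvSeps (ls ++ [x]) = pvSeps ls := by
            rw [hseps, if_neg hx, List.append_nil]
          have hlast : (pvSeps (ls ++ [x])).getLast h = (pvSeps ls).getLast hls := by
            have h1 : (pvSeps (ls ++ [x])).getLast? = some ((pvSeps ls).getLast hls) := by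
              rw [hEq, List.getLast?_eq_some_getLast hls]
            rw [List.getLast?_eq_some_getLast h] at h1
            exact Option.some.inj h1
          have hk := hbnd ((pvSeps ls).getLast hls) (List.getLast_mem hls)
          have hkle : ((pvSeps ls).getLast hls + 1).toNat ≤ ls.length := by omega
          have hsle := pvSkipA_le ls _ hkle
          have htn2 : ((pvSeps (ls ++ [x])).getLast h + 1).toNat =
              ((pvSeps ls).getLast hls + 1).toNat := by rw [hlast]
          obtain ⟨b, hfold, hbiff⟩ := hcons hls
          rw [hst, hfold, htn2]
          by_cases hend : pvSkipA ls ((pvSeps ls).getLast hls + 1).toNat = ls.length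
          · -- the data-row run reached the end of ls: x extends it iff it is a '|' line
            have hb1 : b = true := hbiff.mpr hend
            subst hb1
            by_cases hb : PySem.Str.startswith (PySem.Str.strip x) "|" = true
            · rw [pvSkipA_append ls x _ hkle, if_pos ⟨hend, hb⟩]
              refine ⟨true, ?_, ?_⟩
              · simp only [pvStepB, hx, Bool.false_eq_true, if_false, Bool.true_and, hb, if_true]
                exact congrArg (·, true) (congrArg some (Nat.cast_add_one ls.length).symm)
              · simp
            · rw [pvSkipA_append ls x _ hkle, if_neg (fun hc => hb hc.2)]
              refine ⟨false, ?_, ?_⟩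
              · simp only [pvStepB, hx, Bool.false_eq_true, if_false, Bool.true_and, hb,
                  Bool.false_eq_true, if_false]
              · simp only [List.length_append, List.length_cons, List.length_nil, hend]
                constructor
                · intro hc; exact absurd hc (by simp)
                · intro hc; omega
          · -- the run stopped inside ls: state frozen (in_table already false)
            have hb0 : b = false := by
              cases b
              · rfl
              · exact absurd (hbiff.mp rfl) hend
            subst hb0
            rw [pvSkipA_append ls x _ hkle, if_neg (fun hc => hend hc.1)]
            refine ⟨false, ?_, ?_⟩
            · simp only [pvStepB, hx, Bool.false_eq_true, if_false, Bool.false_and]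
            · simp only [List.length_append, List.length_cons, List.length_nil]
              constructor
              · intro hc; exact absurd hc (by simp)
              · intro hc; omega

-- ===== VERDICT (by name: the statement is the Claim_ definition above) =====
theorem insert_glossary_row_py_spec : Claim_equal_insert_glossary_row_py := by
  intro content row _
  unfold Spec_insert_glossary_row_py
  have key : ∀ ls : List String,
      (if hs : pvSeps ls = [] then PySem.Str.rstrip content ++ "\n" ++ row ++ "\n"
       else PySem.Str.join "\n" (PySem.List.insert ls
              ((pvSkipA ls ((pvSeps ls).getLast hs + 1).toNat : Nat) : Int) row)) =
      (match ((PySem.List.enumerate ls 0).foldl pvStepB (none, false)).1 with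
       | none => PySem.Str.rstrip content ++ "\n" ++ row ++ "\n"
       | some k => PySem.Str.join "\n" (PySem.List.insert ls k row)) := by
    intro ls
    obtain ⟨_, hnil, hcons⟩ := pvMain ls
    by_cases hs : pvSeps ls = []
    · rw [dif_pos hs, hnil hs]
    · obtain ⟨b, hfold, _⟩ := hcons hs
      rw [dif_neg hs, hfold]
  exact key ((PySem.Str.split? content "\n").getD [])
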